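-- pv_equiv track=rewrite | github.com/tuanphung2005/CTDLGT-Slide-PTIT | code/code-ptit/QUAYLUI-NHANHCAN/DSA02002.py | solve
-- ===== SOURCE A (Python) =====
-- def solve(n, a):
--     res = [a]
--     current = a[:]
--
--     while len(current) > 1:
--         next = [current[i] + current[i+1] for i in range(len(current) - 1)]
--         res.append(next)
--         current = next
--
--     res.reverse()
--     return res
-- ===== SOURCE B (Python) =====
-- def solve(n, a):
--     m = len(a)
--     if m == 0:
--         return [[]]
--     # Pascal's triangle rows: rows[d][k] == C(d, k)
--     row = [1]
--     rows = [row]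
--     for _ in range(m - 1):
--         row = [1] + [row[j] + row[j + 1] for j in range(len(row) - 1)] + [1]
--         rows.append(row)
--     # level t (from the apex) is the binomial-weighted window sums of depth m-1-t
--     return [[sum(rows[m - 1 - t][k] * a[i + k] for k in range(m - t))
--              for i in range(t + 1)]
--             for t in range(m)]
-- ===== Notes on version B (the rewrite author's own statement) =====
-- stated objective: alternative
-- what changed: Replaces the iterative repeated-pairwise-sum loop by a closed form: a Pascal's-triangle table of binomial coefficients is built once and each pyramid level is computed directly as binomial-weighted window sums of the input.
import Mathlib
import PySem

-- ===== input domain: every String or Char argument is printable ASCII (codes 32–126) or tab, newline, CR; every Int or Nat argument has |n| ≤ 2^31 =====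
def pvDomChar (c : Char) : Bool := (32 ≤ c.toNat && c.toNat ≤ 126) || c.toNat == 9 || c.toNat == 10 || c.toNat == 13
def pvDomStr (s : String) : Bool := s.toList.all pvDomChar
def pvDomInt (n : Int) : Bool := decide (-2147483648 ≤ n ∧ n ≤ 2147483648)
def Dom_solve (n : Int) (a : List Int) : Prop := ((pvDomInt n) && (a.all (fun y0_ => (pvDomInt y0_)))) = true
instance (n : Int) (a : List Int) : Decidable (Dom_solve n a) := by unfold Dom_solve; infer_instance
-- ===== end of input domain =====

-- B is an alternative closed-form algorithm (Pascal table + binomial window sums), not faster.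
-- ===== PORT A =====
-- next = [current[i] + current[i+1] for i in range(len(current) - 1)]  (all indices in range)
def pvStep (c : List Int) : List Int :=
  (List.range (c.length - 1)).map (fun i => c.getD i 0 + c.getD (i + 1) 0)

theorem pvStep_length (c : List Int) : (pvStep c).length = c.length - 1 := by
  simp [pvStep]

-- the while-loop of A, structural recursion on the shrinking length of current
def pvLoop (res : List (List Int)) (c : List Int) : List (List Int) :=
  if _h : c.length > 1 then pvLoop (res ++ [pvStep c]) (pvStep c) else res
termination_by c.length
decreasing_by simp [pvStep_length]; omega

def solve (n : Int) (a : List Int) : List (List Int) :=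
  (pvLoop [a] a).reverse

-- ===== PORT B =====
-- row = [1] + [row[j] + row[j+1] for j in range(len(row)-1)] + [1]
def pvNextRow (r : List Int) : List Int :=
  1 :: ((List.range (r.length - 1)).map (fun j => r.getD j 0 + r.getD (j + 1) 0)) ++ [1]

-- the for-loop building the Pascal rows: state (row, rows)
def pvBuildRows (m : Nat) : List Int × List (List Int) :=
  (List.range (m - 1)).foldl
    (fun st _ => (pvNextRow st.1, st.2 ++ [pvNextRow st.1]))
    ([1], [[1]])

def solve_alt (n : Int) (a : List Int) : List (List Int) :=
  let m := a.length
  if m = 0 then [[]] else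
    let rows := (pvBuildRows m).2
    (List.range m).map (fun t =>
      (List.range (t + 1)).map (fun i =>
        ((List.range (m - t)).map (fun k =>
          (rows.getD (m - 1 - t) []).getD k 0 * a.getD (i + k) 0)).sum))

-- ===== PRECONDITION & SPEC =====
def Spec_solve (n : Int) (a : List Int) (out : List (List Int)) : Prop := out = solve_alt n a
instance (n : Int) (a : List Int) (out : List (List Int)) : Decidable (Spec_solve n a out) := by unfold Spec_solve; infer_instance

-- ===== CLAIM (what is proved, stated in full; the proofs are below) =====
def Claim_equal_solve : Prop := ∀ (n : Int) (a : List Int), Dom_solve n a → Spec_solve n a (solve n a)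

-- ===== LEMMAS AND PROOFS =====

-- level of depth d of the pyramid over a, in closed form
def pvL (a : List Int) (d : Nat) : List Int :=
  (List.range (a.length - d)).map (fun i =>
    ((List.range (d + 1)).map (fun k => (Nat.choose d k : Int) * a.getD (i + k) 0)).sum)

-- the Pascal row of depth d
def pvRow (d : Nat) : List Int := (List.range (d + 1)).map (fun k => (Nat.choose d k : Int))

theorem pvRow_getD (d j : Nat) (hj : j < d + 1) :
    (pvRow d).getD j 0 = (Nat.choose d j : Int) := by
  simp [pvRow, List.getD_eq_getElem?_getD, hj]

theorem pvNextRow_row (d : Nat) : pvNextRow (pvRow d) = pvRow (d + 1) := by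
  have hlen : (pvRow d).length = d + 1 := by simp [pvRow]
  have lhs : pvNextRow (pvRow d)
      = 1 :: (List.range d).map (fun j => (Nat.choose d j : Int) + (Nat.choose d (j+1) : Int)) ++ [1] := by
    unfold pvNextRow
    rw [hlen]
    simp only [Nat.add_sub_cancel]
    congr 1
    congr 1
    apply List.map_congr_left
    intro j hj
    simp only [List.mem_range] at hj
    rw [pvRow_getD d j (by omega), pvRow_getD d (j+1) (by omega)]
  rw [lhs]
  unfold pvRow
  rw [List.range_succ_eq_map, List.map_cons, List.range_succ, List.map_map, List.map_append]
  simp only [Nat.choose_zero_right, Nat.cast_one, Function.comp, List.map_cons, List.map_nil,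
    Nat.choose_succ_succ, Nat.choose_self, Nat.choose_succ_self, Nat.cast_add]
  simp [Nat.choose_succ_succ]

theorem pvBuildRows_rows (m : Nat) (hm : 1 ≤ m) :
    pvBuildRows m = (pvRow (m - 1), (List.range m).map pvRow) := by
  obtain ⟨k, rfl⟩ : ∃ k, m = k + 1 := ⟨m - 1, by omega⟩
  clear hm
  induction k with
  | zero => simp [pvBuildRows, pvRow, Nat.choose]
  | succ k ih =>
    have step : ∀ j, (List.range (j + 1)).foldl
        (fun (st : List Int × List (List Int)) _ => (pvNextRow st.1, st.2 ++ [pvNextRow st.1]))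
        ([1], [[1]]) = ((pvBuildRows (j + 2)).1, (pvBuildRows (j + 2)).2) := by
      intro j; simp [pvBuildRows]
    have ih' := ih
    simp only [pvBuildRows, Nat.add_sub_cancel] at ih' ⊢
    rw [List.range_succ, List.foldl_append]
    rw [ih']
    simp [List.foldl, pvNextRow_row, List.range_succ]

theorem pvSumRangeMap (n : Nat) (f : Nat → Int) :
    ((List.range n).map f).sum = ∑ i ∈ Finset.range n, f i := rfl

theorem pvL_getD (a : List Int) (d j : Nat) (hj : j < a.length - d) :
    (pvL a d).getD j 0 =
    ((List.range (d + 1)).map (fun k => (Nat.choose d k : Int) * a.getD (j + k) 0)).sum := by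
  simp [pvL, List.getD_eq_getElem?_getD, hj]

theorem pvStep_pvL (a : List Int) (d : Nat) (hd : d + 2 ≤ a.length) :
    pvStep (pvL a d) = pvL a (d + 1) := by
  have hlen : (pvL a d).length = a.length - d := by simp [pvL]
  apply List.ext_getElem
  · simp [pvStep, pvL]; omega
  intro i h1 h2
  simp only [pvStep, hlen] at h1 ⊢
  simp only [List.length_range, List.length_map] at h1
  have hi : i < a.length - d - 1 := by simpa using h1
  rw [List.getElem_map, List.getElem_range]
  rw [pvL_getD a d i (by omega), pvL_getD a d (i + 1) (by omega)]
  have rhs : (pvL a (d+1))[i] =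
      ((List.range (d + 2)).map (fun k => (Nat.choose (d+1) k : Int) * a.getD (i + k) 0)).sum := by
    have := pvL_getD a (d+1) i (by omega)
    rw [List.getD_eq_getElem?_getD, List.getElem?_eq_getElem h2] at this
    simpa using this
  rw [rhs]
  rw [pvSumRangeMap, pvSumRangeMap, pvSumRangeMap]
  rw [Finset.sum_range_succ' fun k => (Nat.choose (d+1) k : Int) * a.getD (i + k) 0]
  have expand : ∀ k, (Nat.choose (d+1) (k+1) : Int) * a.getD (i + (k+1)) 0
      = (Nat.choose d k : Int) * a.getD (i + 1 + k) 0
        + (Nat.choose d (k+1) : Int) * a.getD (i + (k+1)) 0 := by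
    intro k
    have h : i + (k + 1) = i + 1 + k := by omega
    rw [Nat.choose_succ_succ', h]
    push_cast
    ring
  rw [Finset.sum_congr rfl (fun k _ => expand k), Finset.sum_add_distrib]
  have shift : ∑ k ∈ Finset.range (d + 1), (Nat.choose d (k+1) : Int) * a.getD (i + (k+1)) 0
      = ∑ k ∈ Finset.range (d + 1), (Nat.choose d k : Int) * a.getD (i + k) 0
        - (Nat.choose d 0 : Int) * a.getD i 0 := by
    have h := Finset.sum_range_succ' (fun k => (Nat.choose d k : Int) * a.getD (i + k) 0) (d + 1)
    rw [Finset.sum_range_succ (fun k => (Nat.choose d k : Int) * a.getD (i + k) 0) (d + 1)] at h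
    simp only [Nat.choose_succ_self, Nat.cast_zero, zero_mul, add_zero] at h
    omega
  rw [shift]
  simp only [Nat.choose_zero_right, Nat.cast_one, one_mul, Nat.add_zero]
  ring

-- the loop unrolled: starting from level d with at least 2 elements left
theorem pvLoop_eq (a : List Int) (d : Nat) (res : List (List Int)) (hd : d < a.length) :
    pvLoop res (pvL a d) = res ++ (List.range (a.length - 1 - d)).map (fun j => pvL a (d + 1 + j)) := by
  have hlen : (pvL a d).length = a.length - d := by simp [pvL]
  by_cases h2 : d + 2 ≤ a.length
  · rw [pvLoop]
    have : (pvL a d).length > 1 := by omega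
    rw [dif_pos this, pvStep_pvL a d h2, pvLoop_eq a (d + 1) _ (by omega)]
    have hr : a.length - 1 - d = (a.length - 1 - (d+1)) + 1 := by omega
    rw [hr, List.range_succ_eq_map]
    simp only [List.map_cons, List.map_map, List.append_assoc]
    congr 1
    simp only [List.cons_append, List.singleton_append, List.nil_append]
    congr 1
    apply List.map_congr_left
    intro j _
    simp only [Function.comp]
    congr 1
    omega
  · rw [pvLoop]
    have : ¬ (pvL a d).length > 1 := by omega
    rw [dif_neg this]
    have : a.length - 1 - d = 0 := by omega
    simp [this]
termination_by a.length - d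
decreasing_by omega

theorem pvL_zero (a : List Int) : pvL a 0 = a := by
  apply List.ext_getElem
  · simp [pvL]
  intro i h1 h2
  simp only [pvL, Nat.sub_zero, List.getElem_map, List.getElem_range, List.length_map,
    List.length_range] at h1 ⊢
  simp [List.getD_eq_getElem?_getD, List.getElem?_eq_getElem, h2, Nat.choose]

theorem solve_closed (n : Int) (a : List Int) (ha : a ≠ []) :
    solve n a = ((List.range a.length).map (fun d => pvL a d)).reverse := by
  have hm : 0 < a.length := List.length_pos_iff.mpr ha
  unfold solve
  have h := pvLoop_eq a 0 [pvL a 0] hm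
  rw [pvL_zero a] at h
  rw [h]
  congr 1
  obtain ⟨k, hk⟩ : ∃ k, a.length = k + 1 := ⟨a.length - 1, by omega⟩
  rw [hk]
  rw [List.range_succ_eq_map, List.map_cons, List.map_map]
  simp only [Nat.add_sub_cancel, Nat.sub_zero, List.singleton_append, pvL_zero]
  congr 1
  apply List.map_congr_left
  intro j _
  simp only [Function.comp]
  congr 1
  omega

theorem solve_alt_closed (n : Int) (a : List Int) (ha : a ≠ []) :
    solve_alt n a = (List.range a.length).map (fun t => pvL a (a.length - 1 - t)) := by
  have hm : 0 < a.length := List.length_pos_iff.mpr ha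
  unfold solve_alt
  simp only [if_neg (by omega : ¬ a.length = 0)]
  rw [pvBuildRows_rows a.length hm]
  apply List.map_congr_left
  intro t ht
  simp only [List.mem_range] at ht
  have hrow : ((List.range a.length).map pvRow).getD (a.length - 1 - t) [] =
      pvRow (a.length - 1 - t) := by
    simp [List.getD_eq_getElem?_getD, (by omega : a.length - 1 - t < a.length)]
  rw [hrow]
  simp only [pvL]
  have h1 : a.length - (a.length - 1 - t) = t + 1 := by omega
  have h2 : a.length - t = (a.length - 1 - t) + 1 := by omega
  rw [h1, h2]
  apply List.map_congr_left
  intro i _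
  congr 1
  apply List.map_congr_left
  intro k hk
  simp only [List.mem_range] at hk
  have : (pvRow (a.length - 1 - t)).getD k 0 = (Nat.choose (a.length - 1 - t) k : Int) := by
    simp [pvRow, List.getD_eq_getElem?_getD, List.getElem?_map, List.getElem?_range,
      List.getElem?_eq_getElem, hk]
  rw [this]

theorem reverse_map_range {α : Type} (m : Nat) (f : Nat → α) :
    ((List.range m).map f).reverse = (List.range m).map (fun t => f (m - 1 - t)) := by
  apply List.ext_getElem
  · simp
  intro i h1 h2
  simp only [List.length_reverse, List.length_map, List.length_range] at h1
  rw [List.getElem_reverse]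
  simp only [List.getElem_map, List.getElem_range, List.length_map, List.length_range]

-- ===== VERDICT (by name: the statement is the Claim_ definition above) =====
theorem solve_spec : Claim_equal_solve := by
  intro n a _
  unfold Spec_solve
  by_cases ha : a = []
  · subst ha
    simp [solve, solve_alt, pvLoop]
  · rw [solve_closed n a ha, solve_alt_closed n a ha, reverse_map_range]
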